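-- pv_equiv track=rewrite | github.com/henri-priest/misc | puzzles/hackerrankanagram.py | makeAnagram
-- ===== SOURCE A (Python) =====
-- def makeAnagram(a, b):
--
--     # Custom code
--
--     union = set(a) & set(b)
--
--     count = 0
--
--     for i in a:
--         if i not in union:
--             count +=1
--
--     for i in b:
--         if i not in union:
--             count +=1
--
--     for i in union:
--         n1 = a.count(i)
--         n2 = b.count(i)
--         count += abs(n1-n2)
--
--     return count
-- ===== SOURCE B (Python) =====
-- def makeAnagram(a, b):
--     sa = sorted(a)
--     sb = sorted(b)
--     i = j = 0
--     count = 0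
--     while i < len(sa) and j < len(sb):
--         if sa[i] == sb[j]:
--             i += 1
--             j += 1
--         elif sa[i] < sb[j]:
--             count += 1
--             i += 1
--         else:
--             count += 1
--             j += 1
--     return count + (len(sa) - i) + (len(sb) - j)
-- ===== Notes on version B (the rewrite author's own statement) =====
-- stated objective: alternative
-- what changed: Replaces set-intersection plus per-character frequency counting with sorting both strings and a single two-pointer merge pass that counts mismatches and leftover tails.
import Mathlib
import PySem

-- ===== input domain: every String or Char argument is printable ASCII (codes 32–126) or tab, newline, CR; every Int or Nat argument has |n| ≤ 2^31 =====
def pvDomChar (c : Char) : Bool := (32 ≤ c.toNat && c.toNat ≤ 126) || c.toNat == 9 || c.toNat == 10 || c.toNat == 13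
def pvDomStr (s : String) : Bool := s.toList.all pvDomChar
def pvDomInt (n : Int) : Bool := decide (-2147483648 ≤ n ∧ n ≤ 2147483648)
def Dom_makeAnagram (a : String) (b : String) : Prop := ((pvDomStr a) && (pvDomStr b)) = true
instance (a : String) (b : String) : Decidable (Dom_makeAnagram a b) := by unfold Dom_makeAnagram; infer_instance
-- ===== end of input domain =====

-- B replaces set-intersection + per-character frequency counting by sorting both
-- strings and one two-pointer merge pass (alternative decomposition; no speed claim).


-- ===== PORT A =====
-- iteration over the strings is over their character lists; `a.count(i)` with a
-- length-1 needle i equals the character count in the list (exact: one-character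
-- substrings cannot overlap), so it is ported as List.count; the third loop iterates
-- a Python set, whose order is not modelled, but the summed result is order-independent.
def makeAnagram (a : String) (b : String) : Int :=
  let la := a.toList
  let lb := b.toList
  let union : PySem.Set Char := PySem.Set.inter (PySem.Set.ofList la) (PySem.Set.ofList lb)
  let count : Int := la.foldl (fun c i => if i ∉ union then c + 1 else c) 0
  let count := lb.foldl (fun c i => if i ∉ union then c + 1 else c) count
  union.foldl (fun c i => c + |(la.count i : Int) - (lb.count i : Int)|) count

-- ===== PORT B =====
-- Source B's while loop over indices i, j is ported as the equivalent structural
-- recursion over the two remaining suffixes; the post-loop tail additions of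
-- (len(sa)-i) + (len(sb)-j) are the base cases.
def mergeCount : List Char → List Char → Int
  | [], ys => (ys.length : Int)
  | x :: xs, [] => ((x :: xs).length : Int)
  | x :: xs, y :: ys =>
    if x = y then mergeCount xs ys
    else if x < y then 1 + mergeCount xs (y :: ys)
    else 1 + mergeCount (x :: xs) ys

def makeAnagram_alt (a : String) (b : String) : Int :=
  mergeCount (PySem.List.sorted a.toList (fun x => x) false)
             (PySem.List.sorted b.toList (fun x => x) false)

-- ===== PRECONDITION & SPEC =====
def Spec_makeAnagram (a : String) (b : String) (out : Int) : Prop := out = makeAnagram_alt a b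
instance (a : String) (b : String) (out : Int) : Decidable (Spec_makeAnagram a b out) := by unfold Spec_makeAnagram; infer_instance

-- ===== CLAIM (what is proved, stated in full; the proofs are below) =====
def Claim_equal_makeAnagram : Prop := ∀ (a : String) (b : String), Dom_makeAnagram a b → Spec_makeAnagram a b (makeAnagram a b)

-- ===== LEMMAS AND PROOFS =====

-- B-side: the merge count of two sorted lists is |xs| + |ys| - 2·|xs ∩ ys| (multiset inter).
theorem mergeCount_eq (xs ys : List Char) :
    xs.Pairwise (· ≤ ·) → ys.Pairwise (· ≤ ·) →
    mergeCount xs ys =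
      (xs.length : Int) + ys.length - 2 * ((↑xs ∩ ↑ys : Multiset Char)).card := by
  induction xs, ys using mergeCount.induct with
  | case1 ys => intro _ _; simp [mergeCount]
  | case2 x xs => intro _ _; simp [mergeCount]
  | case3 xs y ys ih =>
      intro hx hy
      have h1 : (y ::ₘ (↑xs : Multiset Char)) ∩ (y ::ₘ (↑ys : Multiset Char))
          = y ::ₘ ((↑xs : Multiset Char) ∩ ↑ys) := by
        rw [Multiset.cons_inter_of_pos _ (Multiset.mem_cons_self y _), Multiset.erase_cons_head]
      simp only [mergeCount]
      rw [ih (List.pairwise_cons.mp hx).2 (List.pairwise_cons.mp hy).2]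
      rw [show ((↑(y :: xs) : Multiset Char)) = y ::ₘ ↑xs from (Multiset.cons_coe y xs).symm,
          show ((↑(y :: ys) : Multiset Char)) = y ::ₘ ↑ys from (Multiset.cons_coe y ys).symm, h1]
      push_cast [List.length_cons, Multiset.card_cons]
      ring
  | case4 x xs y ys hne hlt ih =>
      intro hx hy
      have hnot : x ∉ (↑(y :: ys) : Multiset Char) := by
        simp only [← Multiset.cons_coe, Multiset.mem_cons, Multiset.mem_coe]
        rintro (rfl | hm)
        · exact hne rfl
        · exact absurd hlt (not_lt.mpr ((List.pairwise_cons.mp hy).1 x hm))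
      simp only [mergeCount, if_neg hne, if_pos hlt]
      rw [ih (List.pairwise_cons.mp hx).2 hy]
      rw [show ((↑(x :: xs) : Multiset Char)) = x ::ₘ ↑xs from (Multiset.cons_coe x xs).symm,
          Multiset.cons_inter_of_neg _ hnot]
      push_cast [List.length_cons, Multiset.card_cons]
      ring
  | case5 x xs y ys hne hge ih =>
      intro hx hy
      have hylt : y < x := lt_of_le_of_ne (not_lt.mp hge) (fun h => hne h.symm)
      have hnot : y ∉ (↑(x :: xs) : Multiset Char) := by
        simp only [← Multiset.cons_coe, Multiset.mem_cons, Multiset.mem_coe]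
        rintro (rfl | hm)
        · exact hne rfl
        · exact absurd hylt (not_lt.mpr ((List.pairwise_cons.mp hx).1 y hm))
      have h2 : (↑(x :: xs) : Multiset Char) ∩ ↑(y :: ys) = (↑(x :: xs) : Multiset Char) ∩ ↑ys := by
        rw [show ((↑(y :: ys) : Multiset Char)) = y ::ₘ ↑ys from (Multiset.cons_coe y ys).symm,
            Multiset.inter_comm, Multiset.cons_inter_of_neg _ hnot, Multiset.inter_comm]
      simp only [mergeCount, if_neg hne, if_neg hge]
      rw [h2, ih hx (List.pairwise_cons.mp hy).2]
      push_cast [List.length_cons, Multiset.card_cons]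
      ring

-- A-side helpers
theorem countP_mem_cons (l : List Char) (u : Char) (U : List Char) (h : u ∉ U) :
    l.countP (fun i => decide (i ∈ u :: U)) = l.count u + l.countP (fun i => decide (i ∈ U)) := by
  induction l with
  | nil => simp
  | cons a l ih =>
      simp only [List.countP_cons, List.count_cons, ih]
      by_cases hau : a = u
      · subst hau
        simp [h]
        omega
      · simp [hau, List.mem_cons]
        by_cases haU : a ∈ U <;> simp [haU] <;> omega

-- counting the members of a duplicate-free list U inside l = summing per-element counts
theorem countP_mem_eq_sum (l U : List Char) (hU : U.Nodup) :
    l.countP (fun i => decide (i ∈ U)) = (U.map (fun u => l.count u)).sum := by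
  induction U with
  | nil => simp
  | cons u U ih =>
      rw [countP_mem_cons l u U (List.nodup_cons.mp hU).1, ih (List.nodup_cons.mp hU).2]
      simp

theorem countP_not_mem (l U : List Char) :
    l.countP (fun i => !decide (i ∈ U)) + l.countP (fun i => decide (i ∈ U)) = l.length := by
  induction l with
  | nil => simp
  | cons a l ih =>
      simp only [List.countP_cons, List.length_cons]
      by_cases h : a ∈ U <;> simp [h] <;> omega

-- the multiset-intersection card as a sum of per-character minima over any nodup
-- list U whose members are exactly the characters occurring in both lists
theorem inter_card_eq_sum (la lb U : List Char) (hU : U.Nodup)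
    (hmem : ∀ u, u ∈ U ↔ u ∈ la ∧ u ∈ lb) :
    ((↑la ∩ ↑lb : Multiset Char)).card
      = (U.map (fun u => min (la.count u) (lb.count u))).sum := by
  have h1 : ((↑la ∩ ↑lb : Multiset Char)).card
      = ∑ i ∈ ((↑la ∩ ↑lb : Multiset Char)).toFinset, ((↑la ∩ ↑lb : Multiset Char)).count i :=
    (Multiset.toFinset_sum_count_eq _).symm
  have hsub : ((↑la ∩ ↑lb : Multiset Char)).toFinset ⊆ U.toFinset := by
    intro i hi
    rw [Multiset.mem_toFinset, Multiset.mem_inter] at hi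
    rw [List.mem_toFinset, hmem]
    exact ⟨Multiset.mem_coe.mp hi.1, Multiset.mem_coe.mp hi.2⟩
  rw [h1, ← List.sum_toFinset _ hU]
  rw [Finset.sum_subset hsub]
  · apply Finset.sum_congr rfl
    intro i _
    simp only [Multiset.count_inter, Multiset.coe_count]
  · intro i _ hi
    rw [Multiset.mem_toFinset] at hi
    have := Multiset.count_eq_zero.mpr hi
    rw [Multiset.count_inter] at this
    simpa using this

theorem sum_abs_eq (f g : Char → Nat) (U : List Char) :
    ((U.map (fun u => |(f u : Int) - (g u : Int)|)).sum : Int)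
      = ((U.map f).sum : Int) + ((U.map g).sum : Int)
        - 2 * ((U.map (fun u => min (f u) (g u))).sum : Int) := by
  induction U with
  | nil => simp
  | cons u U ih =>
      simp only [List.map_cons, List.sum_cons, ih]
      push_cast
      rcases le_total ((f u : Int)) ((g u : Int)) with h | h
      · rw [abs_of_nonpos (by omega), min_eq_left h]; ring
      · rw [abs_of_nonneg (by omega), min_eq_right h]; ring

theorem portA_eq (a b : String) :
    makeAnagram a b =
      (a.toList.length : Int) + b.toList.length
        - 2 * ((↑a.toList ∩ ↑b.toList : Multiset Char)).card := by
  unfold makeAnagram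
  dsimp only
  set la := a.toList with hla
  set lb := b.toList with hlb
  set U : PySem.Set Char := PySem.Set.inter (PySem.Set.ofList la) (PySem.Set.ofList lb) with hU
  have hUnodup : U.Nodup := PySem.Set.nodup_inter _ _ (PySem.Set.nodup_ofList la)
  have hUmem : ∀ u, u ∈ U ↔ u ∈ la ∧ u ∈ lb := by
    intro u
    rw [hU, PySem.Set.mem_inter, PySem.Set.mem_ofList, PySem.Set.mem_ofList]
  rw [PySem.List.foldl_ite_add_one, PySem.List.foldl_ite_add_one, PySem.List.foldl_add]
  rw [inter_card_eq_sum la lb U hUnodup hUmem, sum_abs_eq]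
  have e1 := countP_mem_eq_sum la U hUnodup
  have e2 := countP_mem_eq_sum lb U hUnodup
  have c1 := countP_not_mem la U
  have c2 := countP_not_mem lb U
  rw [← e1, ← e2]
  simp only [decide_not]
  omega

theorem portB_eq (a b : String) :
    makeAnagram_alt a b =
      (a.toList.length : Int) + b.toList.length
        - 2 * ((↑a.toList ∩ ↑b.toList : Multiset Char)).card := by
  unfold makeAnagram_alt
  have hsa : (PySem.List.sorted a.toList (fun x => x) false).Pairwise (· ≤ ·) := by
    simpa using PySem.List.sorted_pairwise a.toList (fun x => x)
  have hsb : (PySem.List.sorted b.toList (fun x => x) false).Pairwise (· ≤ ·) := by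
    simpa using PySem.List.sorted_pairwise b.toList (fun x => x)
  rw [mergeCount_eq _ _ hsa hsb]
  have pa : ((PySem.List.sorted a.toList (fun x => x) false : List Char) : Multiset Char) = ↑a.toList :=
    Multiset.coe_eq_coe.mpr (PySem.List.sorted_perm a.toList (fun x => x) false)
  have pb : ((PySem.List.sorted b.toList (fun x => x) false : List Char) : Multiset Char) = ↑b.toList :=
    Multiset.coe_eq_coe.mpr (PySem.List.sorted_perm b.toList (fun x => x) false)
  rw [pa, pb, PySem.List.length_sorted, PySem.List.length_sorted]

-- ===== VERDICT (by name: the statement is the Claim_ definition above) =====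
theorem makeAnagram_spec : Claim_equal_makeAnagram := by
  intro a b _
  unfold Spec_makeAnagram
  rw [portA_eq, portB_eq]
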